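-- pv_equiv track=rewrite | github.com/rubygitflow/leetcode_python | all_unique_pairs.py | countUniquePairs
-- ===== SOURCE A (Python) =====
-- from math import factorial
-- from typing import List
--
-- def countUniquePairs(nums: List[int]) -> List[List[int]]:
--     ''' Just count all the unique pairs from the numeric array '''
--     if len(nums) < 2:
--         return 0
--     unic = set(nums)
--     # count duplicates
--     setter, double = set(), set()
--     for v in nums:
--         if v in setter:
--             double.add(v)
--         setter.add(v)
--     return (factorial(len(unic) - 1) if len(unic) > 1 else 0) + len(double)
-- ===== SOURCE B (Python) =====
-- from math import factorial
-- from typing import List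
--
-- def countUniquePairs(nums: List[int]) -> List[List[int]]:
--     ''' Sort, then scan adjacent runs: run starts give distinct values,
--         runs reaching length 2 give duplicated values '''
--     if len(nums) < 2:
--         return 0
--     s = sorted(nums)
--     unic, double, run = 1, 0, 1
--     for prev, cur in zip(s, s[1:]):
--         if cur == prev:
--             run += 1
--             if run == 2:
--                 double += 1
--         else:
--             unic += 1
--             run = 1
--     return (factorial(unic - 1) if unic > 1 else 0) + double
-- ===== Notes on version B (the rewrite author's own statement) =====
-- stated objective: alternative
-- what changed: Replaces A's hash-set bookkeeping (set(nums) plus an incremental seen/duplicates pair of sets) with a sort-then-scan: sort the list once, then one pass over adjacent pairs counting run starts (distinct values) and runs that reach length 2 (duplicated values).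
import Mathlib
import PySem

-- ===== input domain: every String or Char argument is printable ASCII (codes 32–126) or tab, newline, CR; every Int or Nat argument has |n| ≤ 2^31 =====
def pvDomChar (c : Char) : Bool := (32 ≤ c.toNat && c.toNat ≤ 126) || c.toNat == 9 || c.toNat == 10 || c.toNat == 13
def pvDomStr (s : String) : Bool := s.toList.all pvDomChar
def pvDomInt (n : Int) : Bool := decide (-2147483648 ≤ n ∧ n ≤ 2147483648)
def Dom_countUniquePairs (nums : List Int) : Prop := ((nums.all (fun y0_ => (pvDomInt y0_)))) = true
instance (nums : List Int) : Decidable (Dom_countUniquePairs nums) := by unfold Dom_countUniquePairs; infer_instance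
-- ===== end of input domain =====

-- B replaces A's incremental hash-set bookkeeping with sort-then-scan over adjacent runs; objective: alternative.

-- ===== PORT A =====
def countUniquePairs (nums : List Int) : Int :=
  if nums.length < 2 then 0
  else
    let unic : PySem.Set Int := PySem.Set.ofList nums
    let sd := nums.foldl
      (fun (p : PySem.Set Int × PySem.Set Int) v =>
        (PySem.Set.add p.1 v,
         if PySem.Set.contains p.1 v then PySem.Set.add p.2 v else p.2))
      (PySem.Set.empty, PySem.Set.empty)
    (if 1 < PySem.Set.len unic then ((Nat.factorial (PySem.Set.len unic - 1).toNat : Nat) : Int) else 0)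
      + PySem.Set.len sd.2

-- ===== PORT B =====
-- the loop body of Source B: state (unic, double, run), element (prev, cur)
def cupStep (st : Int × Int × Int) (pc : Int × Int) : Int × Int × Int :=
  if pc.2 = pc.1 then
    (st.1, (if st.2.2 + 1 = 2 then st.2.1 + 1 else st.2.1), st.2.2 + 1)
  else
    (st.1 + 1, st.2.1, 1)

def countUniquePairs_alt (nums : List Int) : Int :=
  if nums.length < 2 then 0
  else
    let s := PySem.List.sorted nums (fun x => x) false
    let st := (s.zip (PySem.List.slice s (some 1) none)).foldl cupStep (1, 0, 1)
    (if 1 < st.1 then ((Nat.factorial (st.1 - 1).toNat : Nat) : Int) else 0) + st.2.1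

-- ===== PRECONDITION & SPEC =====
def Spec_countUniquePairs (nums : List Int) (out : Int) : Prop := out = countUniquePairs_alt nums
instance (nums : List Int) (out : Int) : Decidable (Spec_countUniquePairs nums out) := by unfold Spec_countUniquePairs; infer_instance

-- ===== CLAIM (what is proved, stated in full; the proofs are below) =====
def Claim_equal_countUniquePairs : Prop := ∀ (nums : List Int), Dom_countUniquePairs nums → Spec_countUniquePairs nums (countUniquePairs nums)

-- ===== LEMMAS AND PROOFS =====

-- number of distinct values of x :: t, split off the head
lemma distinct_cons_card (x : Int) (t : List Int) :
    (((x :: t).toFinset.card : Nat) : Int)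
      = 1 + ((t.toFinset.filter (fun v => v ≠ x)).card : Int) := by
  rw [List.toFinset_cons, Finset.filter_ne']
  rw [show insert x t.toFinset = insert x (t.toFinset.erase x) by
        ext v; by_cases hv : v = x <;> simp [hv]]
  rw [Finset.card_insert_of_notMem (Finset.notMem_erase x _)]
  push_cast; ring

-- number of duplicated values of x :: t, split off the head
lemma dup_cons_card (x : Int) (t : List Int) :
    ((((x :: t).toFinset.filter (fun v => 2 ≤ (x :: t).count v)).card : Nat) : Int)
      = (if x ∈ t then 1 else 0)
        + ((t.toFinset.filter (fun v => v ≠ x ∧ 2 ≤ t.count v)).card : Int) := by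
  have hset : (x :: t).toFinset.filter (fun v => 2 ≤ (x :: t).count v)
      = (if x ∈ t then {x} else ∅) ∪ t.toFinset.filter (fun v => v ≠ x ∧ 2 ≤ t.count v) := by
    ext v
    by_cases hv : v = x
    · subst hv
      have h1 : (v :: t).count v = t.count v + 1 := List.count_cons_self
      by_cases hm : v ∈ t
      · have : 1 ≤ t.count v := List.one_le_count_iff.2 hm
        simp [h1, hm]
      · have h0 : t.count v = 0 := List.count_eq_zero.2 hm
        simp [h1, hm, h0]
    · have h1 : (x :: t).count v = t.count v := by
        rw [List.count_cons]; simp [Ne.symm hv]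
      by_cases hm : x ∈ t <;> simp [h1, hv, hm]
  rw [hset, Finset.card_union_of_disjoint]
  · by_cases hm : x ∈ t <;> simp [hm]
  · by_cases hm : x ∈ t <;> simp [hm, Finset.disjoint_left]

-- B's scan invariant: over a sorted list x :: t, starting from run length r of x,
-- the fold counts the distinct values of t beyond x and the duplicated values
lemma scan_inv (t : List Int) : ∀ (x u d r : Int), (x :: t).Pairwise (· ≤ ·) → 1 ≤ r →
    ((((x :: t).zip t).foldl cupStep (u, d, r)).1
        = u + ((t.toFinset.filter (fun v => v ≠ x)).card : Int)) ∧
    ((((x :: t).zip t).foldl cupStep (u, d, r)).2.1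
        = d + (if r = 1 ∧ x ∈ t then 1 else 0)
            + ((t.toFinset.filter (fun v => v ≠ x ∧ 2 ≤ t.count v)).card : Int)) := by
  induction t with
  | nil => intro x u d r _ _; simp
  | cons y t' ih =>
    intro x u d r hsort hr
    have hsort' : (y :: t').Pairwise (· ≤ ·) := hsort.of_cons
    have hxy : x ≤ y := (List.pairwise_cons.1 hsort).1 y (by simp)
    rw [List.zip_cons_cons, List.foldl_cons]
    by_cases hy : y = x
    · subst hy
      have hstep : cupStep (u, d, r) (y, y) = (u, if r + 1 = 2 then d + 1 else d, r + 1) := by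
        simp [cupStep]
      rw [hstep]
      obtain ⟨h1, h2⟩ := ih y u (if r + 1 = 2 then d + 1 else d) (r + 1) hsort' (by omega)
      have hfil1 : (y :: t').toFinset.filter (fun v => v ≠ y)
          = t'.toFinset.filter (fun v => v ≠ y) := by
        ext v; by_cases hv : v = y <;> simp [hv]
      have hfil2 : (y :: t').toFinset.filter (fun v => v ≠ y ∧ 2 ≤ (y :: t').count v)
          = t'.toFinset.filter (fun v => v ≠ y ∧ 2 ≤ t'.count v) := by
        ext v; by_cases hv : v = y
        · simp [hv]
        · have hc : (y :: t').count v = t'.count v := by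
            rw [List.count_cons]; simp [Ne.symm hv]
          simp [hv, hc]
      constructor
      · rw [h1, hfil1]
      · rw [h2, hfil2]
        have hne : ¬ (r + 1 = 1 ∧ y ∈ t') := by omega
        have hmem : ((r = 1 ∧ y ∈ y :: t') ↔ r = 1) := by simp
        rw [if_neg hne, if_congr hmem rfl rfl]
        split_ifs <;> omega
    · have hstep : cupStep (u, d, r) (x, y) = (u + 1, d, 1) := by
        simp [cupStep, hy]
      rw [hstep]
      obtain ⟨h1, h2⟩ := ih y (u + 1) d 1 hsort' le_rfl
      have hyz : ∀ z ∈ t', y ≤ z := (List.pairwise_cons.1 hsort').1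
      have hxnot : x ∉ y :: t' := by
        intro hmem
        rcases List.mem_cons.1 hmem with h | h
        · exact hy (h.symm)
        · exact hy (le_antisymm hxy (hyz x h)).symm
      constructor
      · rw [h1]
        have hfil : (y :: t').toFinset.filter (fun v => v ≠ x) = (y :: t').toFinset := by
          apply Finset.filter_true_of_mem
          intro v hv hvx
          exact hxnot (hvx ▸ List.mem_toFinset.1 hv)
        rw [hfil]
        have := distinct_cons_card y t'
        push_cast at this ⊢
        omega
      · rw [h2]
        have hfil : (y :: t').toFinset.filter (fun v => v ≠ x ∧ 2 ≤ (y :: t').count v)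
            = (y :: t').toFinset.filter (fun v => 2 ≤ (y :: t').count v) := by
          apply Finset.filter_congr
          intro v hv
          have : v ≠ x := fun h => hxnot (h ▸ List.mem_toFinset.1 hv)
          simp [this]
        rw [hfil, dup_cons_card y t']
        have hno : ¬ (r = 1 ∧ x ∈ y :: t') := fun h => hxnot h.2
        have h11 : (((1:Int) = 1 ∧ y ∈ t') ↔ y ∈ t') := by simp
        rw [if_neg hno, if_congr h11 rfl rfl]
        split_ifs <;> omega

-- A's duplicate loop: invariant over the processed prefix p
lemma loopA_inv (l : List Int) : ∀ (p D : List Int), D.Nodup →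
    (∀ v, v ∈ D ↔ 2 ≤ p.count v) →
    (l.foldl
      (fun (q : PySem.Set Int × PySem.Set Int) v =>
        (PySem.Set.add q.1 v,
         if PySem.Set.contains q.1 v then PySem.Set.add q.2 v else q.2))
      (PySem.Set.ofList p, D)).2.Nodup ∧
    (∀ v, v ∈ (l.foldl
      (fun (q : PySem.Set Int × PySem.Set Int) v =>
        (PySem.Set.add q.1 v,
         if PySem.Set.contains q.1 v then PySem.Set.add q.2 v else q.2))
      (PySem.Set.ofList p, D)).2 ↔ 2 ≤ (p ++ l).count v) := by
  induction l with
  | nil => intro p D hnd hmem; simpa using ⟨hnd, hmem⟩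
  | cons v l ih =>
    intro p D hnd hmem
    have hstep : PySem.Set.add (PySem.Set.ofList p) v = PySem.Set.ofList (p ++ [v]) :=
      (PySem.Set.ofList_append_singleton p v).symm
    have hsplit : p ++ v :: l = (p ++ [v]) ++ l := by simp
    by_cases h : v ∈ p
    · have hc : PySem.Set.contains (PySem.Set.ofList p) v = true := by
        rw [PySem.Set.contains_iff]; exact (PySem.Set.mem_ofList p v).2 h
      have := ih (p ++ [v]) (PySem.Set.add D v) (PySem.Set.nodup_add D v hnd)
        (by
          intro w
          rw [PySem.Set.mem_add, hmem w]
          by_cases hw : w = v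
          · subst hw
            have : 1 ≤ p.count w := List.one_le_count_iff.2 h
            simp [List.count_append]
            omega
          · have hw' : v ≠ w := Ne.symm hw
            simp [List.count_append, hw']
            omega)
      simp only [List.foldl_cons, hc, hstep] at this ⊢
      rw [hsplit]
      exact this
    · have hc : PySem.Set.contains (PySem.Set.ofList p) v = false := by
        rw [← Bool.not_eq_true, PySem.Set.contains_iff]
        simpa [PySem.Set.mem_ofList] using h
      have := ih (p ++ [v]) D hnd
        (by
          intro w
          rw [hmem w]
          by_cases hw : w = v
          · subst hw
            have h0 : p.count w = 0 := List.count_eq_zero.2 h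
            simp [List.count_append, h0]
          · have hw' : v ≠ w := Ne.symm hw
            simp [List.count_append, hw'])
      simp only [List.foldl_cons, hc, Bool.false_eq_true, if_false, hstep] at this ⊢
      rw [hsplit]
      exact this

-- A's unic set has as many elements as nums has distinct values
lemma unic_len (nums : List Int) :
    PySem.Set.len (PySem.Set.ofList nums) = ((nums.toFinset.card : Nat) : Int) := by
  have hnd : (PySem.Set.ofList nums).Nodup := PySem.Set.nodup_ofList nums
  have hfe : (PySem.Set.ofList nums).toFinset = nums.toFinset := by
    ext v; simp [List.mem_toFinset, PySem.Set.mem_ofList]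
  have : (PySem.Set.ofList nums).toFinset.card = (PySem.Set.ofList nums).length :=
    List.toFinset_card_of_nodup hnd
  show ((PySem.Set.ofList nums).length : Int) = _
  rw [← this, hfe]

-- A's duplicate set has as many elements as nums has duplicated values
lemma double_len (nums : List Int) :
    PySem.Set.len
      (nums.foldl
        (fun (q : PySem.Set Int × PySem.Set Int) v =>
          (PySem.Set.add q.1 v,
           if PySem.Set.contains q.1 v then PySem.Set.add q.2 v else q.2))
        (PySem.Set.empty, PySem.Set.empty)).2
      = (((nums.toFinset.filter (fun v => 2 ≤ nums.count v)).card : Nat) : Int) := by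
  obtain ⟨hnd, hmem⟩ := loopA_inv nums [] [] (by simp) (by simp)
  simp only [List.nil_append] at hnd hmem
  have e : ((PySem.Set.empty : PySem.Set Int), (PySem.Set.empty : PySem.Set Int))
      = (PySem.Set.ofList ([] : List Int), ([] : List Int)) := rfl
  rw [e]
  set D := (nums.foldl
    (fun (q : PySem.Set Int × PySem.Set Int) v =>
      (PySem.Set.add q.1 v,
       if PySem.Set.contains q.1 v then PySem.Set.add q.2 v else q.2))
    (PySem.Set.ofList ([] : List Int), ([] : List Int))).2 with hD
  have hfe : D.toFinset = nums.toFinset.filter (fun v => 2 ≤ nums.count v) := by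
    ext v
    rw [Finset.mem_filter, List.mem_toFinset, List.mem_toFinset, hmem v]
    constructor
    · intro h; exact ⟨List.one_le_count_iff.1 (by omega), h⟩
    · exact fun h => h.2
  have hc : D.toFinset.card = D.length := List.toFinset_card_of_nodup hnd
  show ((D.length : Nat) : Int) = _
  rw [← hc, hfe]

-- ===== VERDICT =====
theorem countUniquePairs_spec : Claim_equal_countUniquePairs := by
  unfold Claim_equal_countUniquePairs Spec_countUniquePairs
  intro nums _
  unfold countUniquePairs countUniquePairs_alt
  by_cases hlen : nums.length < 2
  · simp [hlen]
  · simp only [hlen, if_false]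
    have hperm : (PySem.List.sorted nums (fun x => x) false).Perm nums :=
      PySem.List.sorted_perm nums _ _
    have hpw : (PySem.List.sorted nums (fun x => x) false).Pairwise (· ≤ ·) :=
      PySem.List.sorted_pairwise nums _
    obtain ⟨x, t, hxt⟩ : ∃ x t, PySem.List.sorted nums (fun x => x) false = x :: t := by
      cases hc : PySem.List.sorted nums (fun x => x) false with
      | nil =>
        exfalso
        have := hperm.length_eq
        rw [hc] at this
        simp at this
        omega
      | cons a b => exact ⟨a, b, rfl⟩
    rw [hxt] at hperm hpw ⊢
    rw [PySem.List.slice_from_one, List.tail_cons]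
    obtain ⟨h1, h2⟩ := scan_inv t x 1 0 1 hpw le_rfl
    have hU : ((x :: t).zip t |>.foldl cupStep (1, 0, 1)).1 = ((nums.toFinset.card : Nat) : Int) := by
      rw [h1, ← distinct_cons_card, List.toFinset_eq_of_perm _ _ hperm]
    have hD : ((x :: t).zip t |>.foldl cupStep (1, 0, 1)).2.1
        = (((nums.toFinset.filter (fun v => 2 ≤ nums.count v)).card : Nat) : Int) := by
      rw [h2]
      have h11 : (((1:Int) = 1 ∧ x ∈ t) ↔ x ∈ t) := by simp
      rw [if_congr h11 rfl rfl]
      have : nums.toFinset.filter (fun v => 2 ≤ nums.count v)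
          = (x :: t).toFinset.filter (fun v => 2 ≤ (x :: t).count v) := by
        rw [← List.toFinset_eq_of_perm _ _ hperm]
        apply Finset.filter_congr
        intro v _
        rw [hperm.count_eq]
      rw [this, dup_cons_card]
      ring
    rw [unic_len, double_len, hU, hD]
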